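-- pv_equiv track=rewrite | github.com/Songwooseok123/classes-small_Projects | 2022인공지능학과 파이썬 실습조교/프로그래밍기초/프밍526.py | vowel_numbering
-- ===== SOURCE A (Python) =====
-- def vowel_numbering(word):
--     number = 1
--     newword = ''
--     for c in word:
--         if c in ['a','e','i','o','u','A','E','I','O','U']:
--             newword = newword + str(number)
--             number = number + 1
--         else:
--             newword = newword + c
--     return newword
-- ===== SOURCE B (Python) =====
-- VOWELS = frozenset('aeiouAEIOU')
--
-- def vowel_numbering(word):
--     # pass 1: prefix vowel counts — counts[i] is the rank of the vowel at i (if any)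
--     counts = []
--     k = 0
--     for c in word:
--         if c in VOWELS:
--             k += 1
--         counts.append(k)
--     # pass 2: build the result in one join, no running counter needed
--     return ''.join(str(k) if c in VOWELS else c for c, k in zip(word, counts))
-- ===== Notes on version B (the rewrite author's own statement) =====
-- stated objective: alternative
-- what changed: Replaces the single stateful loop with repeated string concatenation by a two-phase plan: a prefix-vowel-count pass (counts[i] = rank of the vowel at position i), then one str.join over zip(word, counts), so the replacement pass carries no counter state and no incremental string rebuilding.
import Mathlib
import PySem

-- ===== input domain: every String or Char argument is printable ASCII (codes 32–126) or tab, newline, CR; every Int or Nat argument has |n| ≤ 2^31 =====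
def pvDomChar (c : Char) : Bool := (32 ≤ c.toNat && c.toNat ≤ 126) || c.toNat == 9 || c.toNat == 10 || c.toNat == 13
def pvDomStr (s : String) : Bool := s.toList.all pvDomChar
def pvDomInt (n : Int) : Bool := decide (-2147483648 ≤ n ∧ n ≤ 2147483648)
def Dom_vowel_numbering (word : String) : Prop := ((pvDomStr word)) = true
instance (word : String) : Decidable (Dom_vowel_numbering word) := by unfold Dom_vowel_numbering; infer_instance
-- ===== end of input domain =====

-- B replaces the stateful concatenation loop by a prefix-count pass plus one join (alternative decomposition).


-- ===== PORT A =====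
-- A's literal vowel list ['a','e','i','o','u','A','E','I','O','U']
def vnVowelList : List Char := ['a','e','i','o','u','A','E','I','O','U']

-- for c in word: if c in [...]: newword += str(number); number += 1 else: newword += c
def vowel_numbering (word : String) : String :=
  String.ofList
    (word.toList.foldl
      (fun (st : Int × List Char) c =>
        if vnVowelList.contains c then (st.1 + 1, st.2 ++ PySem.Int.toChars st.1)
        else (st.1, st.2 ++ [c]))
      (1, [])).2

-- ===== PORT B =====
-- VOWELS = frozenset('aeiouAEIOU')  (membership test only)
def vnIsVowel (c : Char) : Bool := "aeiouAEIOU".toList.contains c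

-- pass 1: counts[i] = number of vowels among word[0..i]
def vnCounts (cs : List Char) : List Int :=
  (cs.foldl
    (fun (st : Int × List Int) c =>
      let k := if vnIsVowel c then st.1 + 1 else st.1
      (k, st.2 ++ [k]))
    (0, [])).2

-- pass 2: ''.join(str(k) if c in VOWELS else c for c, k in zip(word, counts))
def vowel_numbering_alt (word : String) : String :=
  String.ofList (PySem.Chars.join []
    ((word.toList.zip (vnCounts word.toList)).map
      (fun p => if vnIsVowel p.1 then PySem.Int.toChars p.2 else [p.1])))

-- ===== PRECONDITION & SPEC =====
def Spec_vowel_numbering (word : String) (out : String) : Prop := out = vowel_numbering_alt word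
instance (word : String) (out : String) : Decidable (Spec_vowel_numbering word out) := by unfold Spec_vowel_numbering; infer_instance

-- ===== CLAIM (what is proved, stated in full; the proofs are below) =====
def Claim_equal_vowel_numbering : Prop := ∀ (word : String), Dom_vowel_numbering word → Spec_vowel_numbering word (vowel_numbering word)

-- ===== LEMMAS AND PROOFS =====

-- reference recursion: what both programs produce from counter value n onward
def vnSpec (cs : List Char) (n : Int) : List Char :=
  match cs with
  | [] => []
  | c :: rest =>
      if vnIsVowel c then PySem.Int.toChars n ++ vnSpec rest (n + 1)
      else c :: vnSpec rest n

-- the prefix counts from a start value k, written as a direct recursion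
def vnCountsFrom (cs : List Char) (k : Int) : List Int :=
  match cs with
  | [] => []
  | c :: rest =>
      let k' := if vnIsVowel c then k + 1 else k
      k' :: vnCountsFrom rest k'

theorem vnVowel_eq (c : Char) : vnVowelList.contains c = vnIsVowel c := by
  simp [vnVowelList, vnIsVowel]

theorem vowel_A_fold (cs : List Char) :
    ∀ (n : Int) (acc : List Char),
      (cs.foldl
        (fun (st : Int × List Char) c =>
          if vnVowelList.contains c then (st.1 + 1, st.2 ++ PySem.Int.toChars st.1)
          else (st.1, st.2 ++ [c]))
        (n, acc)).2 = acc ++ vnSpec cs n := by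
  induction cs with
  | nil => intro n acc; simp [vnSpec]
  | cons c rest ih =>
      intro n acc
      rw [List.foldl_cons]
      by_cases h : vnIsVowel c
      · rw [show (vnVowelList.contains c) = true by rw [vnVowel_eq]; exact h]
        simp only [if_true]
        rw [ih]; simp [vnSpec, h]
      · rw [show (vnVowelList.contains c) = false by rw [vnVowel_eq]; simp [h]]
        simp only [Bool.false_eq_true, if_false]
        rw [ih]; simp [vnSpec, h]

theorem vnCounts_fold (cs : List Char) :
    ∀ (k : Int) (acc : List Int),
      (cs.foldl
        (fun (st : Int × List Int) c =>
          let k := if vnIsVowel c then st.1 + 1 else st.1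
          (k, st.2 ++ [k]))
        (k, acc)).2 = acc ++ vnCountsFrom cs k := by
  induction cs with
  | nil => intro k acc; simp [vnCountsFrom]
  | cons c rest ih =>
      intro k acc
      simp only [List.foldl_cons, vnCountsFrom]
      by_cases h : vnIsVowel c
      · simp [h, ih]
      · simp [h, ih]

-- ''.join with empty separator is flatten
theorem vnJoinNil {A : Type} (ps : List (List A)) : List.intercalate [] ps = ps.flatten := by
  induction ps with
  | nil => rfl
  | cons a t ih =>
      cases t with
      | nil => simp [List.intercalate]
      | cons b r =>
          simp only [List.intercalate, List.intersperse_cons₂, List.flatten_cons] at *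
          simp [ih]

theorem vnZipJoin (cs : List Char) :
    ∀ (k : Int),
      ((cs.zip (vnCountsFrom cs k)).map
        (fun p => if vnIsVowel p.1 then PySem.Int.toChars p.2 else [p.1])).flatten
      = vnSpec cs (k + 1) := by
  induction cs with
  | nil => intro k; simp [vnCountsFrom, vnSpec]
  | cons c rest ih =>
      intro k
      simp only [vnCountsFrom, vnSpec]
      by_cases h : vnIsVowel c
      · simp [h, List.zip_cons_cons, ih]
      · simp [h, List.zip_cons_cons, ih]

-- ===== VERDICT (by name: the statement is the Claim_ definition above) =====
theorem vowel_numbering_spec : Claim_equal_vowel_numbering := by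
  intro word _
  unfold Spec_vowel_numbering vowel_numbering vowel_numbering_alt vnCounts
  rw [vowel_A_fold, vnCounts_fold]
  simp only [PySem.Chars.join, vnJoinNil, List.nil_append]
  rw [vnZipJoin]
  norm_num
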